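-- pv_equiv track=rewrite | github.com/EnzoProvesco/HPC_Assignement | mergeLogMem.py | strip_commas
-- ===== SOURCE A (Python) =====
-- def strip_commas(input_string):
--     #check if a comma is inside a "" which a lot of character in between the ""
--     in_quotes = False
--     result = []
--     for char in input_string:
--         if char == '"':
--             in_quotes = not in_quotes
--         if char == ',' and in_quotes:
--             result.append('.')
--         else:
--             result.append(char)
--     return ''.join(result)
-- ===== SOURCE B (Python) =====
-- def strip_commas(input_string):
--     parts = input_string.split('"')
--     return '"'.join(p if i % 2 == 0 else p.replace(',', '.')
--                     for i, p in enumerate(parts))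
-- ===== Notes on version B (the rewrite author's own statement) =====
-- stated objective: idiomatic
-- what changed: Replaces the per-character in_quotes state machine with a split on the double-quote character, replacing commas by dots only in odd-indexed (inside-quote) segments, then rejoining the segments.
import Mathlib
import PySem

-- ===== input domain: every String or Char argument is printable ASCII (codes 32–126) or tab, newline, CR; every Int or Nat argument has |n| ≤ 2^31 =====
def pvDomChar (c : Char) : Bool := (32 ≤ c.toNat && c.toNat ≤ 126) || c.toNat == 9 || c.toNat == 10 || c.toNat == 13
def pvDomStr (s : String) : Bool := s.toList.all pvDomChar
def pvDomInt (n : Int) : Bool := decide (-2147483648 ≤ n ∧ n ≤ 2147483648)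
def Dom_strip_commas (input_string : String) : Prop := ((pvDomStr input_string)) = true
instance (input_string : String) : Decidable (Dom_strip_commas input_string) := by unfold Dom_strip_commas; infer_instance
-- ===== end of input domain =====

-- B replaces A's per-character in_quotes state machine by split-on-'"' /
-- transform odd segments / rejoin (objective: idiomatic; same asymptotic cost).

-- ===== PORT A =====
-- the for-loop over input_string with state (in_quotes, result)
def pvStepA (st : Bool × List Char) (c : Char) : Bool × List Char :=
  let inq := if c = '"' then !st.1 else st.1
  if c = ',' ∧ inq then (inq, st.2 ++ ['.']) else (inq, st.2 ++ [c])

def strip_commas (input_string : String) : String :=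
  String.mk (input_string.toList.foldl pvStepA (false, [])).2

-- ===== PORT B =====
-- port of input_string.split('"') (exact: single-character separator)
def pvSplitQ : List Char → List (List Char)
  | [] => [[]]
  | c :: rest =>
    if c = '"' then [] :: pvSplitQ rest
    else
      match pvSplitQ rest with
      | s :: ss => (c :: s) :: ss
      | [] => [[c]]

-- port of p.replace(',', '.') (exact: single-character replacement)
def pvReplComma (s : List Char) : List Char :=
  s.map (fun c => if c = ',' then '.' else c)

-- port of '"'.join(p if i % 2 == 0 else p.replace(',', '.') for i, p in enumerate(parts))
def pvJoinAlt (i : Nat) : List (List Char) → List Char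
  | [] => []
  | [s] => if i % 2 = 0 then s else pvReplComma s
  | s :: ss => (if i % 2 = 0 then s else pvReplComma s) ++ '"' :: pvJoinAlt (i + 1) ss

def strip_commas_alt (input_string : String) : String :=
  String.mk (pvJoinAlt 0 (pvSplitQ input_string.toList))

-- ===== PRECONDITION & SPEC =====
def Spec_strip_commas (input_string : String) (out : String) : Prop := out = strip_commas_alt input_string
instance (input_string : String) (out : String) : Decidable (Spec_strip_commas input_string out) := by unfold Spec_strip_commas; infer_instance

-- ===== CLAIM (what is proved, stated in full; the proofs are below) =====
def Claim_equal_strip_commas : Prop := ∀ (input_string : String), Dom_strip_commas input_string → Spec_strip_commas input_string (strip_commas input_string)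

-- ===== LEMMAS AND PROOFS =====

-- A's loop as a direct recursion (q = current in_quotes)
def pvStripRec (q : Bool) : List Char → List Char
  | [] => []
  | c :: rest =>
    let q' := if c = '"' then !q else q
    (if c = ',' ∧ q' then '.' else c) :: pvStripRec q' rest

def pvFinQ (q : Bool) (cs : List Char) : Bool :=
  cs.foldl (fun b c => if c = '"' then !b else b) q

theorem pvFoldl_stepA (cs : List Char) (q : Bool) (acc : List Char) :
    cs.foldl pvStepA (q, acc) = (pvFinQ q cs, acc ++ pvStripRec q cs) := by
  induction cs generalizing q acc with
  | nil => simp [pvStripRec, pvFinQ]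
  | cons c rest ih =>
    simp only [List.foldl_cons, pvStepA, pvStripRec, pvFinQ]
    split_ifs with h <;> rw [ih] <;> simp [pvFinQ]

theorem pvSplitQ_ne_nil (cs : List Char) : pvSplitQ cs ≠ [] := by
  cases cs with
  | nil => simp [pvSplitQ]
  | cons c rest =>
    simp only [pvSplitQ]
    split_ifs
    · simp
    · cases h : pvSplitQ rest <;> simp

theorem pvJoinAlt_mod (i j : Nat) (h : i % 2 = j % 2) (ss : List (List Char)) :
    pvJoinAlt i ss = pvJoinAlt j ss := by
  induction ss generalizing i j with
  | nil => rfl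
  | cons s ss ih =>
    cases ss with
    | nil => simp [pvJoinAlt, h]
    | cons t ts =>
      simp only [pvJoinAlt, h]
      rw [ih (i + 1) (j + 1) (by omega)]

theorem pvStripRec_eq_joinAlt (cs : List Char) (q : Bool) :
    pvStripRec q cs = pvJoinAlt (if q then 1 else 0) (pvSplitQ cs) := by
  induction cs generalizing q with
  | nil => cases q <;> rfl
  | cons c rest ih =>
    obtain ⟨s, ss, h⟩ : ∃ s ss, pvSplitQ rest = s :: ss := by
      cases h : pvSplitQ rest with
      | nil => exact absurd h (pvSplitQ_ne_nil rest)
      | cons s ss => exact ⟨s, ss, rfl⟩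
    by_cases hq : c = '"'
    · subst hq
      cases q with
      | false =>
        simpa [pvStripRec, pvSplitQ, h, pvJoinAlt] using ih true
      | true =>
        have h2 : pvJoinAlt 2 (s :: ss) = pvJoinAlt 0 (s :: ss) :=
          pvJoinAlt_mod 2 0 rfl _
        simpa [pvStripRec, pvSplitQ, h, pvJoinAlt, pvReplComma, h2] using ih false
    · cases ss with
      | nil =>
        cases q <;> by_cases hc : c = ',' <;>
          simpa [pvStripRec, pvSplitQ, h, pvJoinAlt, pvReplComma, hq, hc] using ih _
      | cons t ts =>
        cases q <;> by_cases hc : c = ',' <;>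
          simpa [pvStripRec, pvSplitQ, h, pvJoinAlt, pvReplComma, hq, hc] using ih _

-- ===== VERDICT (by name: the statement is the Claim_ definition above) =====
theorem strip_commas_spec : Claim_equal_strip_commas := by
  intro s _
  unfold Spec_strip_commas strip_commas strip_commas_alt
  rw [pvFoldl_stepA]
  simp [pvStripRec_eq_joinAlt]
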